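-- pv_equiv track=rewrite | github.com/seelenbrecher/code-mixed-normalization | src/helper_function.py | remove_duplication
-- ===== SOURCE A (Python) =====
-- def remove_duplication(token):
--     new_token = ''
--     prev_char = ''
--     length = 0
--     for char in token:
--         if char != prev_char:
--             new_token += char
--             prev_char = char
--             length = 1
--         else:
--             length += 1
--             if length <= 2:
--                 new_token += char
--     return new_token
-- ===== SOURCE B (Python) =====
-- def remove_duplication(token):
--     out = []
--     i = 0
--     n = len(token)
--     while i < n:
--         j = i
--         while j < n and token[j] == token[i]:
--             j += 1
--         out.append(token[i] * min(j - i, 2))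
--         i = j
--     return ''.join(out)
-- ===== Notes on version B (the rewrite author's own statement) =====
-- stated objective: alternative
-- what changed: Replaces the per-character loop with prev_char/length state by a two-pointer run scanner: an inner scan finds each maximal run of equal characters and the character is emitted min(run length, 2) times, joined at the end.
import Mathlib
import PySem

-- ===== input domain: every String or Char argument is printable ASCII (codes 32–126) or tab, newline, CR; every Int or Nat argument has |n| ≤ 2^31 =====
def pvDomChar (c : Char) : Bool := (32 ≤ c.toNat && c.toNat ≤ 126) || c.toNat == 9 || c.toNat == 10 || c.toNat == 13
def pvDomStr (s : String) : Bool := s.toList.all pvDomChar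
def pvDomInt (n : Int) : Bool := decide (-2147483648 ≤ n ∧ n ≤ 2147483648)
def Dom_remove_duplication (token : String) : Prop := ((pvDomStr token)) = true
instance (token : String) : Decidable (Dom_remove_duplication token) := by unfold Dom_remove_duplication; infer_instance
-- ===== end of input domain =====

-- B replaces A's prev_char/length character loop by a two-pointer maximal-run scanner (alternative decomposition, same return value).


-- ===== PORT A =====
-- A's loop state: the built string, the previous character (none models Python's initial ''), the run length counter.
def rdLoop (chars : List Char) (acc : List Char) (prev : Option Char) (len : Nat) : List Char :=
  match chars with
  | [] => acc
  | c :: rest =>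
    if some c ≠ prev then rdLoop rest (acc ++ [c]) (some c) 1
    else if len + 1 ≤ 2 then rdLoop rest (acc ++ [c]) (some c) (len + 1)
    else rdLoop rest acc prev (len + 1)

def remove_duplication (token : String) : String :=
  String.ofList (rdLoop token.toList [] none 0)

-- ===== PORT B =====
-- B's outer while loop: peel the maximal run of the first character (the inner j-scan = takeWhile/dropWhile),
-- emit that character min(run length, 2) times, continue on the remainder.
def rdRuns : List Char → List Char
  | [] => []
  | c :: rest =>
    List.replicate (min ((rest.takeWhile (· == c)).length + 1) 2) c
      ++ rdRuns (rest.dropWhile (· == c))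
termination_by l => l.length
decreasing_by
  simp only [List.length_cons]
  exact Nat.lt_succ_of_le (List.length_dropWhile_le _ _)

def remove_duplication_alt (token : String) : String :=
  String.ofList (rdRuns token.toList)

-- ===== PRECONDITION & SPEC =====
def Spec_remove_duplication (token : String) (out : String) : Prop := out = remove_duplication_alt token
instance (token : String) (out : String) : Decidable (Spec_remove_duplication token out) := by unfold Spec_remove_duplication; infer_instance

-- ===== CLAIM (what is proved, stated in full; the proofs are below) =====
def Claim_equal_remove_duplication : Prop := ∀ (token : String), Dom_remove_duplication token → Spec_remove_duplication token (remove_duplication token)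

-- ===== LEMMAS AND PROOFS =====

-- Once the run counter is ≥ 2, A appends nothing for the rest of a run of c's.
lemma rdLoop_skip (run : List Char) (rest acc : List Char) (c : Char) (n : Nat)
    (h : ∀ x ∈ run, x = c) :
    rdLoop (run ++ rest) acc (some c) (n + 2) = rdLoop rest acc (some c) (n + 2 + run.length) := by
  induction run generalizing n with
  | nil => simp
  | cons x rs ih =>
    have hx : x = c := h x (by simp)
    subst hx
    simp only [List.cons_append, rdLoop, ne_eq, not_true_eq_false, if_false,
      if_neg (by omega : ¬ n + 2 + 1 ≤ 2)]
    have key := ih (n + 1) (fun y hy => h y (by simp [hy]))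
    have harith : n + 1 + 2 = n + 2 + 1 := by omega
    rw [harith] at key
    rw [key]
    congr 1
    simp [List.length_cons]
    omega

-- Processing a run of c's with counter 1: append at most one more c, then skip.
lemma rdLoop_run (run : List Char) (rest acc : List Char) (c : Char)
    (h : ∀ x ∈ run, x = c) :
    rdLoop (run ++ rest) acc (some c) 1
      = rdLoop rest (acc ++ run.take 1) (some c) (1 + run.length) := by
  cases run with
  | nil => simp
  | cons y rs =>
    have hx : y = c := h y (by simp)
    subst hx
    simp only [List.cons_append, rdLoop, ne_eq, not_true_eq_false, if_false,
      if_pos (by omega : 1 + 1 ≤ 2)]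
    have key := rdLoop_skip rs rest (acc ++ [y]) y 0 (fun z hz => h z (by simp [hz]))
    simp only [Nat.zero_add] at key
    have h1 : (y :: rs).take 1 = [y] := rfl
    have h2 : 1 + (y :: rs).length = 2 + rs.length := by simp [List.length_cons]; omega
    rw [key, h1, h2]

-- The head of dropWhile does not satisfy the predicate.
lemma head_dropWhile {p : Char → Bool} (l : List Char) (c : Char)
    (h : (l.dropWhile p).head? = some c) : p c = false := by
  induction l with
  | nil => simp [List.dropWhile] at h
  | cons x xs ih =>
    by_cases hp : p x = true
    · exact ih (by simpa [List.dropWhile, hp] using h)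
    · have hx : x = c := by simpa [List.dropWhile, hp] using h
      subst hx
      simpa using hp

-- One leading c plus the rest of the run, clamped: matches B's min(run length, 2) copies.
lemma replicate_run (run : List Char) (c : Char) (h : ∀ x ∈ run, x = c) :
    c :: run.take 1 = List.replicate (min (run.length + 1) 2) c := by
  cases run with
  | nil => simp
  | cons x rs =>
    have hx : x = c := h x (by simp)
    subst hx
    simp [List.replicate]

lemma rdLoop_eq_rdRuns (n : Nat) :
    ∀ chars : List Char, chars.length ≤ n → ∀ (acc : List Char) (p : Option Char) (len : Nat),
      (∀ c, chars.head? = some c → p ≠ some c) →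
      rdLoop chars acc p len = acc ++ rdRuns chars := by
  induction n with
  | zero =>
    intro chars hlen acc p len _
    have : chars = [] := List.eq_nil_of_length_eq_zero (Nat.le_zero.mp hlen)
    subst this
    simp [rdLoop, rdRuns]
  | succ m ih =>
    intro chars hlen acc p len hhead
    cases chars with
    | nil => simp [rdLoop, rdRuns]
    | cons c rest =>
      have hne : some c ≠ p := fun he => hhead c rfl he.symm
      simp only [rdLoop, if_pos hne]
      have hall : ∀ x ∈ rest.takeWhile (· == c), x = c := by
        intro x hx
        have := List.mem_takeWhile_imp hx
        simpa using this
      have hsplit : rest = rest.takeWhile (· == c) ++ rest.dropWhile (· == c) :=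
        (List.takeWhile_append_dropWhile).symm
      conv_lhs => rw [hsplit]
      rw [rdLoop_run _ _ _ _ hall]
      have hlen' : (rest.dropWhile (· == c)).length ≤ m := by
        have h1 := List.length_dropWhile_le (· == c) rest
        have h2 : rest.length ≤ m := by simpa using Nat.le_of_succ_le_succ hlen
        omega
      have hhead' : ∀ d, (rest.dropWhile (· == c)).head? = some d → (some c : Option Char) ≠ some d := by
        intro d hd he
        have hdc := head_dropWhile rest d hd
        have : c = d := Option.some.inj he
        subst this
        simp at hdc
      rw [ih _ hlen' _ _ _ hhead']
      conv_rhs => rw [rdRuns]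
      rw [← replicate_run _ _ hall]
      simp

-- ===== VERDICT (by name: the statement is the Claim_ definition above) =====
theorem remove_duplication_spec : Claim_equal_remove_duplication := by
  intro token _
  unfold Spec_remove_duplication remove_duplication remove_duplication_alt
  rw [rdLoop_eq_rdRuns token.toList.length token.toList (le_refl _) [] none 0
      (fun c _ h => by simp at h)]
  simp
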